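-- pv_equiv track=rewrite | github.com/vaskers5/Intense | Classify/Classifier.py | __str_fixer
-- ===== SOURCE A (Python) =====
-- def __str_fixer(data):
--     result = []
--     should_append = False
--     str_to_append = ""
--     for sym in data:
--         if should_append and sym != '\'':
--             str_to_append += sym
--         if sym == '\'':
--             if should_append:
--                 result.append(str_to_append.replace(' ', '_').replace('-', '_'))
--                 str_to_append = ""
--             should_append = not should_append
--     return result
-- ===== SOURCE B (Python) =====
-- def __str_fixer(data):
--     parts = data.split("'")
--     quoted = [p for i, p in enumerate(parts) if i % 2 == 1]
--     if len(parts) % 2 == 0: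
--         quoted.pop()  # an unpaired final quote opens no complete segment
--     return [p.replace(' ', '_').replace('-', '_') for p in quoted]
-- ===== Notes on version B (the rewrite author's own statement) =====
-- stated objective: faster
-- what changed: Replaces the character-by-character quote-toggle state machine (boolean flag + string accumulator) with one split on the quote character followed by selecting the odd-index parts (dropping the unterminated trailing part when the quote count is odd) and a replace comprehension.
import Mathlib
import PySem

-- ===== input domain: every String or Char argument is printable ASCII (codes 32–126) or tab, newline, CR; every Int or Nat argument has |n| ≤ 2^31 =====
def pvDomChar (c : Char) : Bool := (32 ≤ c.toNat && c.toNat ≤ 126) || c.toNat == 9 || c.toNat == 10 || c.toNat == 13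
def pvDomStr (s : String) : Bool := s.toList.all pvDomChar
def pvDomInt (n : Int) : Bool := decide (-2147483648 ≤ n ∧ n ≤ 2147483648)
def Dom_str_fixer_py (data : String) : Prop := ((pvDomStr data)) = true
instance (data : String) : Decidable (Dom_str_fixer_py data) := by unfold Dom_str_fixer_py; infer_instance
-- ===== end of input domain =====

-- B replaces A's char-by-char quote-toggle state machine with split-on-quote + odd-index
-- selection (same exact results; a timing run measured B faster by a constant factor).

-- ===== PORT A =====
-- helper: s.replace(' ', '_').replace('-', '_')
def pvFixA (s : String) : String :=
  PySem.Str.replace (PySem.Str.replace s " " "_") "-" "_"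

-- A's for-loop over the characters, state = (result, should_append, str_to_append)
def strFixerLoop (res : List String) (should : Bool) (acc : List Char) :
    List Char → List String
  | [] => res
  | sym :: rest =>
    let acc2 := if should && !(sym == '\'') then acc ++ [sym] else acc
    if sym == '\'' then
      if should then strFixerLoop (res ++ [pvFixA (String.mk acc2)]) false [] rest
      else strFixerLoop res true acc2 rest
    else strFixerLoop res should acc2 rest

def str_fixer_py (data : String) : List String :=
  strFixerLoop [] false [] data.toList

-- ===== PORT B =====
-- data.split("'") → List.splitOn; [p for i,p in enumerate(parts) if i%2==1];
-- pop the last if the quote count is odd; then the replace-comprehension.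
def str_fixer_py_alt (data : String) : List String :=
  let parts := data.toList.splitOn '\''
  let quoted := ((PySem.List.enumerate parts).filter
      (fun ip => PySem.Int.mod ip.1 2 == 1)).map Prod.snd
  let quoted2 := if parts.length % 2 == 0 then quoted.dropLast else quoted
  quoted2.map (fun p =>
    PySem.Str.replace (PySem.Str.replace (String.mk p) " " "_") "-" "_")

-- ===== PRECONDITION & SPEC =====
def Spec_str_fixer_py (data : String) (out : List String) : Prop := out = str_fixer_py_alt data
instance (data : String) (out : List String) : Decidable (Spec_str_fixer_py data out) := by unfold Spec_str_fixer_py; infer_instance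

-- ===== CLAIM (what is proved, stated in full; the proofs are below) =====
def Claim_equal_str_fixer_py : Prop := ∀ (data : String), Dom_str_fixer_py data → Spec_str_fixer_py data (str_fixer_py data)

-- ===== LEMMAS AND PROOFS =====

-- reference reading of the parts list produced by splitOn: outside/inside a quote
def pvCollect (inside : Bool) (acc : List Char) : List (List Char) → List String
  | [] => []
  | [_] => []
  | p :: q :: ps =>
      if inside then pvFixA (String.mk (acc ++ p)) :: pvCollect false [] (q :: ps)
      else pvCollect true acc (q :: ps)

-- elements at odd indices (two-at-a-time recursion)
def pvOdds {α : Type} : List α → List α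
  | [] => []
  | [_] => []
  | _ :: q :: ps => q :: pvOdds ps

theorem pvSplitOn_cons (c x : Char) (xs : List Char) :
    (x :: xs).splitOn c =
      if x == c then [] :: xs.splitOn c else (xs.splitOn c).modifyHead (List.cons x) := by
  simp [List.splitOn, List.splitOnP_cons]

theorem pvSplitOn_ne_nil (c : Char) (l : List Char) : l.splitOn c ≠ [] :=
  List.splitOnP_ne_nil (fun x => x == c) l

theorem pvCollect_nil_cons (inside : Bool) (acc : List Char)
    (parts : List (List Char)) (h : parts ≠ []) :
    pvCollect inside acc ([] :: parts) =
      if inside then pvFixA (String.mk acc) :: pvCollect false [] parts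
      else pvCollect true acc parts := by
  cases parts with
  | nil => exact absurd rfl h
  | cons q ps => simp [pvCollect]

theorem pvCollect_modifyHead (inside : Bool) (acc : List Char) (c : Char)
    (parts : List (List Char)) :
    pvCollect inside acc (parts.modifyHead (List.cons c)) =
      pvCollect inside (if inside then acc ++ [c] else acc) parts := by
  match parts with
  | [] => cases inside <;> simp [pvCollect]
  | [p] => cases inside <;> simp [pvCollect]
  | p :: q :: ps => cases inside <;> simp [pvCollect, List.append_assoc]

theorem pvLoop_eq_collect (l : List Char) (res : List String) (inside : Bool)
    (acc : List Char) :
    strFixerLoop res inside acc l = res ++ pvCollect inside acc (l.splitOn '\'') := by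
  induction l generalizing res inside acc with
  | nil => simp [strFixerLoop, List.splitOn_nil, pvCollect]
  | cons c t ih =>
    rw [pvSplitOn_cons]
    by_cases hc : c = '\''
    · subst hc
      rw [if_pos (show (('\'' == '\'') = true) from rfl),
        pvCollect_nil_cons _ _ _ (pvSplitOn_ne_nil _ _)]
      cases inside with
      | false => simpa [strFixerLoop] using ih res true acc
      | true => simp [strFixerLoop, ih, List.append_assoc]
    · have hc' : (c == '\'') = false := by simp [hc]
      rw [if_neg (by simp [hc]), pvCollect_modifyHead]
      cases inside with
      | false => simpa [strFixerLoop, hc'] using ih res false acc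
      | true => simpa [strFixerLoop, hc'] using ih (res) true (acc ++ [c])

theorem pvOdds_length {α : Type} (l : List α) : (pvOdds l).length = l.length / 2 := by
  fun_induction pvOdds l with
  | case1 => simp
  | case2 => simp
  | case3 p q ps ih => simp [ih]; omega

theorem pvCollect_eq_odds (parts : List (List Char)) :
    pvCollect false [] parts =
      (if parts.length % 2 == 0 then (pvOdds parts).dropLast else pvOdds parts).map
        (fun p => pvFixA (String.mk p)) := by
  fun_induction pvOdds parts with
  | case1 => simp [pvCollect]
  | case2 p => simp [pvCollect]
  | case3 p q ps ih =>
    cases ps with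
    | nil => simp [pvCollect, pvOdds]
    | cons r ps' =>
      rw [show pvCollect false [] (p :: q :: r :: ps') =
            pvFixA (String.mk q) :: pvCollect false [] (r :: ps') from by simp [pvCollect],
          ih]
      by_cases he : (r :: ps').length % 2 = 0
      · have hA : ((p :: q :: r :: ps').length % 2 == 0) = true := by
          simp only [List.length_cons] at he
          simp only [List.length_cons, beq_iff_eq]
          omega
        have hB : ((r :: ps').length % 2 == 0) = true := by rw [he]; rfl
        have hne : pvOdds (r :: ps') ≠ [] := by
          intro h
          have hl := pvOdds_length (r :: ps')
          rw [h] at hl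
          simp only [List.length_nil, List.length_cons] at hl he
          omega
        rw [hA, hB, if_pos rfl, if_pos rfl,
          List.dropLast_cons_of_ne_nil hne, List.map_cons]
      · have hA : ((p :: q :: r :: ps').length % 2 == 0) = false := by
          simp only [List.length_cons] at he
          simp only [List.length_cons, beq_eq_false_iff_ne, ne_eq]
          omega
        have hB : ((r :: ps').length % 2 == 0) = false := by
          simp only [beq_eq_false_iff_ne, ne_eq]
          exact he
        rw [hA, hB, if_neg (by simp), if_neg (by simp), List.map_cons]

theorem pvEnum_filter_odd (parts : List (List Char)) (n : Int)
    (hn : PySem.Int.mod n 2 = 0) :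
    ((PySem.List.enumerate parts n).filter
        (fun ip => PySem.Int.mod ip.1 2 == 1)).map Prod.snd = pvOdds parts := by
  fun_induction pvOdds parts generalizing n with
  | case1 => simp [PySem.List.enumerate_nil]
  | case2 p =>
    have h1 : (PySem.Int.mod n 2 == 1) = false := by rw [hn]; rfl
    simp only [PySem.List.enumerate_cons, PySem.List.enumerate_nil,
      List.filter_cons, h1, List.filter_nil]
    rfl
  | case3 p q ps ih =>
    have hn' : n % 2 = 0 := by
      have h := hn
      simp only [PySem.Int.mod] at h
      rw [Int.fmod_eq_emod] at h
      simp at h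
      omega
    have h1 : (PySem.Int.mod n 2 == 1) = false := by rw [hn]; rfl
    have h2 : (PySem.Int.mod (n + 1) 2 == 1) = true := by
      have : PySem.Int.mod (n + 1) 2 = 1 := by
        simp only [PySem.Int.mod]; rw [Int.fmod_eq_emod]; omega
      rw [this]; rfl
    have h3 : PySem.Int.mod (n + 1 + 1) 2 = 0 := by
      simp only [PySem.Int.mod]; rw [Int.fmod_eq_emod]; omega
    simp only [PySem.List.enumerate_cons, List.filter_cons, h1, h2, if_true]
    exact congrArg (q :: ·) (ih _ h3)

-- ===== VERDICT (by name: the statement is the Claim_ definition above) =====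
theorem str_fixer_py_spec : Claim_equal_str_fixer_py := by
  intro data _
  show str_fixer_py data = str_fixer_py_alt data
  rw [str_fixer_py, str_fixer_py_alt, pvLoop_eq_collect, pvCollect_eq_odds]
  simp only [pvEnum_filter_odd _ 0 rfl, List.nil_append]
  rfl
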